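-- pv_equiv track=rewrite | github.com/SirDaXll/Alg-Busq | backend/DFS.py | search_anime_dfs
-- ===== SOURCE A (Python) =====
-- def search_anime_dfs(graph, start_node, target):
--     visited = set()
--     stack = [start_node]
--
--     while stack:
--         node = stack.pop()
--         visited.add(node)
--
--         # Verificar si el nodo actual es el anime objetivo
--         if node == target:
--             return node
--
--         # Obtener los vecinos del nodo actual
--         neighbors = graph.get(node, [])
--
--         # Agregar los vecinos no visitados a la pila
--         for neighbor in neighbors:
--             if neighbor not in visited:
--                 stack.append(neighbor)
--
--     # Si no se encuentra el anime objetivo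
--     return None
-- ===== SOURCE B (Python) =====
-- def search_anime_dfs(graph, start_node, target):
--     # Fixed-point iteration: grow the set of reachable nodes until it stops
--     # changing, then answer by membership.
--     reach = {start_node}
--     while True:
--         bigger = reach | {nb for node in reach for nb in graph.get(node, [])}
--         if bigger == reach:
--             break
--         reach = bigger
--     return target if target in reach else None
-- ===== Notes on version B (the rewrite author's own statement) =====
-- stated objective: alternative
-- what changed: replaces the explicit-stack DFS that searches for the target with a monotone fixed-point iteration that grows the full reachable set until it stabilises and then answers by membership
import Mathlib
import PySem

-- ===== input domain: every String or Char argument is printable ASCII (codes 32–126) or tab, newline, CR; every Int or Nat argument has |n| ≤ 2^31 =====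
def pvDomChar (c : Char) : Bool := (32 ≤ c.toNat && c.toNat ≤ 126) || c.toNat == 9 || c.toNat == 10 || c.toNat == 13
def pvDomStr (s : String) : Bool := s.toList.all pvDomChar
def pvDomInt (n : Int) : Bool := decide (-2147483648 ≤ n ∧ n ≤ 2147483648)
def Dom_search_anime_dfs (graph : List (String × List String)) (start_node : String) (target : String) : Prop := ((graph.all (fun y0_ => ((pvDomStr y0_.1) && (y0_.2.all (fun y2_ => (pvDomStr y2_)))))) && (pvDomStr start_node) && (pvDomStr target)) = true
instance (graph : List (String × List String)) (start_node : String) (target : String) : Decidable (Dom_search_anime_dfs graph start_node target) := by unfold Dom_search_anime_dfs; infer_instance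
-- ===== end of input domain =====

-- B replaces A's explicit-stack DFS by a fixed-point iteration of the reachable
-- set; same return value, no speed claim ("alternative").

-- ===== PORT A =====

-- graph.get(node, []) on the insertion-ordered dict
def pvAdj (g : List (String × List String)) (n : String) : List String :=
  (PySem.Dict.mk g).getD n []

-- all nodes the graph mentions (keys and neighbours); used only by the
-- termination measures of the two loops
def pvUniv (g : List (String × List String)) : List String :=
  g.flatMap (fun p => p.1 :: p.2)

def pvDeg (g : List (String × List String)) : Nat :=
  g.foldr (fun p acc => max p.2.length acc) 0

def pvC (g : List (String × List String)) : Nat := pvDeg g + 2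

def pvUnvis (g : List (String × List String)) (V S : List String) : Nat :=
  ((pvUniv g ++ S).toFinset \ V.toFinset).card

def pvMu (g : List (String × List String)) (V S : List String) : Nat :=
  pvC g ^ pvUnvis g V S *
    (S.countP (fun v => !decide (v ∈ V)) + pvC g * S.countP (fun v => decide (v ∈ V)))

-- lemmas the port's decreasing_by cites
theorem pvAdj_cases (g : List (String × List String)) (n : String) :
    pvAdj g n = [] ∨ ∃ p, p ∈ g ∧ pvAdj g n = p.2 := by
  induction g with
  | nil => left; rfl
  | cons p rest ih =>
    rw [pvAdj, PySem.Dict.getD_eq_get?_getD, PySem.Dict.get?_mk_cons]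
    by_cases h : p.1 == n
    · right; exact ⟨p, by simp, by simp [h]⟩
    · simp only [h, Bool.false_eq_true, if_false]
      have : ({ items := rest } : PySem.Dict String (List String)).get? n = (PySem.Dict.mk rest).get? n := rfl
      rw [this, ← PySem.Dict.getD_eq_get?_getD, ← pvAdj]
      rcases ih with h' | ⟨q, hq, h'⟩
      · left; exact h'
      · right; exact ⟨q, List.mem_cons_of_mem _ hq, h'⟩

theorem pvAdj_sub_univ (g : List (String × List String)) (n x : String)
    (hx : x ∈ pvAdj g n) : x ∈ pvUniv g := by
  rcases pvAdj_cases g n with h | ⟨p, hp, h⟩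
  · rw [h] at hx; cases hx
  · rw [h] at hx
    exact List.mem_flatMap.2 ⟨p, hp, List.mem_cons_of_mem _ hx⟩

theorem pvMem_deg (g : List (String × List String)) (p : String × List String)
    (hp : p ∈ g) : p.2.length ≤ pvDeg g := by
  induction g with
  | nil => cases hp
  | cons q rest ih =>
    rcases List.mem_cons.1 hp with hp' | hp'
    · simp [pvDeg, hp']
    · exact le_trans (ih hp') (by simp only [pvDeg, List.foldr_cons]; omega)

theorem pvAdj_len (g : List (String × List String)) (n : String) :
    (pvAdj g n).length ≤ pvDeg g := by
  rcases pvAdj_cases g n with h | ⟨p, hp, h⟩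
  · simp [h]
  · rw [h]; exact pvMem_deg g p hp

theorem arith1 (a b C k cu cv : Nat) (hab : a ≤ b) (hb : 0 < b) (hk : k + 2 ≤ C) :
    a * (k + cu + C * cv) < b * (cu + C * (cv + 1)) := by
  have h1 : k + cu + C * cv < cu + C * (cv + 1) := by
    have : C * (cv + 1) = C * cv + C := by ring
    omega
  calc a * (k + cu + C * cv) ≤ b * (k + cu + C * cv) := Nat.mul_le_mul hab le_rfl
    _ < b * (cu + C * (cv + 1)) := mul_lt_mul_of_pos_left h1 hb

theorem arith2 (a b C k cu cv cu' cv' L : Nat) (h2 : 2 ≤ C) (hk : k + 2 ≤ C)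
    (hpow : a * C ≤ b) (ha : 0 < a) (hL1 : cu' + cv' = L) (hL2 : cu + cv = L) :
    a * (k + cu' + C * cv') < b * (cu + 1 + C * cv) := by
  have hc1 : cu' + C * cv' ≤ C * L := by
    have h5 : C * L = C * cu' + C * cv' := by rw [← hL1]; ring
    have h6 : cu' ≤ C * cu' := Nat.le_mul_of_pos_left _ (by omega)
    omega
  have h1 : k + cu' + C * cv' < C * (1 + L) := by
    have : C * (1 + L) = C + C * L := by ring
    omega
  have h2' : 1 + L ≤ cu + 1 + C * cv := by
    have h7 : cv ≤ C * cv := Nat.le_mul_of_pos_left _ (by omega)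
    omega
  calc a * (k + cu' + C * cv') < a * (C * (1 + L)) := mul_lt_mul_of_pos_left h1 ha
    _ = (a * C) * (1 + L) := by ring
    _ ≤ b * (1 + L) := Nat.mul_le_mul hpow le_rfl
    _ ≤ b * (cu + 1 + C * cv) := Nat.mul_le_mul le_rfl h2'

theorem pvCountP_split (V l : List String) :
    l.countP (fun v => !decide (v ∈ V)) + l.countP (fun v => decide (v ∈ V)) = l.length := by
  induction l with
  | nil => rfl
  | cons a t ih => by_cases h : a ∈ V <;> simp [h] <;> omega

-- the strict decrease of pvMu at each loop step (proved below the claim block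
-- would be too late: the port cites it in its decreasing_by)
theorem pvMu_dec (g : List (String × List String)) (V V' : List String) (node : String)
    (rest new : List String)
    (hV' : ∀ x, x ∈ V' ↔ x ∈ V ∨ x = node)
    (hlen : new.length ≤ pvDeg g)
    (huniv : ∀ x ∈ new, x ∈ pvUniv g)
    (hfresh : ∀ x ∈ new, ¬ x ∈ V')
    : pvMu g V' (new ++ rest) < pvMu g V (node :: rest) := by
  classical
  have hC2 : 2 ≤ pvC g := by unfold pvC; omega
  have hsub : ((pvUniv g ++ (new ++ rest)).toFinset \ V'.toFinset) ⊆
      ((pvUniv g ++ (node :: rest)).toFinset \ V.toFinset) := by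
    intro x hx
    simp only [Finset.mem_sdiff, List.mem_toFinset, List.mem_append, List.mem_cons] at hx ⊢
    obtain ⟨hx1, hx2⟩ := hx
    refine ⟨?_, fun hxV => hx2 ((hV' x).2 (Or.inl hxV))⟩
    rcases hx1 with h | h | h
    · exact Or.inl h
    · exact Or.inl (huniv x h)
    · exact Or.inr (Or.inr h)
  have hu : pvUnvis g V' (new ++ rest) ≤ pvUnvis g V (node :: rest) :=
    Finset.card_le_card hsub
  have hpow : pvC g ^ pvUnvis g V' (new ++ rest) ≤ pvC g ^ pvUnvis g V (node :: rest) :=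
    Nat.pow_le_pow_right (by omega) hu
  have hbpos : 0 < pvC g ^ pvUnvis g V (node :: rest) := Nat.pow_pos (by omega)
  have hapos : 0 < pvC g ^ pvUnvis g V' (new ++ rest) := Nat.pow_pos (by omega)
  have hcu_new : new.countP (fun v => !decide (v ∈ V')) = new.length :=
    List.countP_eq_length.2 (by intro a ha; simp [hfresh a ha])
  have hcv_new : new.countP (fun v => decide (v ∈ V')) = 0 :=
    List.countP_eq_zero.2 (by intro a ha; simp [hfresh a ha])
  have hk : new.length + 2 ≤ pvC g := by
    have := hlen; unfold pvC; omega
  by_cases hnode : node ∈ V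
  · -- node already visited: same visited set, head weight pvC g, new entries each weight 1
    have hVV : ∀ x, (x ∈ V') ↔ (x ∈ V) := by
      intro x; rw [hV']
      exact ⟨fun h => h.elim id (fun hx => hx ▸ hnode), Or.inl⟩
    have hcongr1 : rest.countP (fun v => !decide (v ∈ V')) = rest.countP (fun v => !decide (v ∈ V)) :=
      List.countP_congr (fun a _ => by simp [hVV a])
    have hcongr2 : rest.countP (fun v => decide (v ∈ V')) = rest.countP (fun v => decide (v ∈ V)) :=
      List.countP_congr (fun a _ => by simp [hVV a])
    have e1 : (new ++ rest).countP (fun v => !decide (v ∈ V')) =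
        new.length + rest.countP (fun v => !decide (v ∈ V)) := by
      rw [List.countP_append, hcu_new, hcongr1]
    have e2 : (new ++ rest).countP (fun v => decide (v ∈ V')) =
        rest.countP (fun v => decide (v ∈ V)) := by
      rw [List.countP_append, hcv_new, hcongr2]; omega
    have e3 : (node :: rest).countP (fun v => !decide (v ∈ V)) =
        rest.countP (fun v => !decide (v ∈ V)) := by
      simp [hnode]
    have e4 : (node :: rest).countP (fun v => decide (v ∈ V)) =
        rest.countP (fun v => decide (v ∈ V)) + 1 := by
      simp [hnode]
    unfold pvMu
    rw [e1, e2, e3, e4]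
    exact arith1 _ _ _ _ _ _ hpow hbpos hk
  · -- node freshly visited: the unvisited count strictly drops
    have hnodeV' : node ∈ V' := (hV' node).2 (Or.inr rfl)
    have hss : ((pvUniv g ++ (new ++ rest)).toFinset \ V'.toFinset) ⊂
        ((pvUniv g ++ (node :: rest)).toFinset \ V.toFinset) := by
      refine ⟨hsub, fun hcon => ?_⟩
      have hmem : node ∈ (pvUniv g ++ (node :: rest)).toFinset \ V.toFinset := by
        simp [hnode]
      have := hcon hmem
      simp [hnodeV'] at this
    have hu2 : pvUnvis g V' (new ++ rest) + 1 ≤ pvUnvis g V (node :: rest) :=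
      Finset.card_lt_card hss
    have hpow1 : pvC g ^ pvUnvis g V' (new ++ rest) * pvC g ≤
        pvC g ^ pvUnvis g V (node :: rest) := by
      calc pvC g ^ pvUnvis g V' (new ++ rest) * pvC g
          = pvC g ^ (pvUnvis g V' (new ++ rest) + 1) := by rw [pow_succ]
        _ ≤ _ := Nat.pow_le_pow_right (by omega) hu2
    have hrest1 := pvCountP_split V' rest
    have hrest2 := pvCountP_split V rest
    have e1 : (new ++ rest).countP (fun v => !decide (v ∈ V')) =
        new.length + rest.countP (fun v => !decide (v ∈ V')) := by
      rw [List.countP_append, hcu_new]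
    have e2 : (new ++ rest).countP (fun v => decide (v ∈ V')) =
        rest.countP (fun v => decide (v ∈ V')) := by
      rw [List.countP_append, hcv_new]; omega
    have e3 : (node :: rest).countP (fun v => !decide (v ∈ V)) =
        rest.countP (fun v => !decide (v ∈ V)) + 1 := by
      simp [hnode]
    have e4 : (node :: rest).countP (fun v => decide (v ∈ V)) =
        rest.countP (fun v => decide (v ∈ V)) := by
      simp [hnode]
    unfold pvMu
    rw [e1, e2, e3, e4]
    exact arith2 _ _ _ _ _ _ _ _ rest.length hC2 hk hpow1 hapos
      (by omega) (by omega)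

-- the unvisited neighbours of node, pushed on the stack (top-first: Python
-- pops from the end and pushes in neighbour order, so the pushed block is the
-- reversed filtered neighbour list)
def pvPush (g : List (String × List String)) (visited' : List String)
    (node : String) (rest : List String) : List String :=
  ((pvAdj g node).filter (fun n => !(PySem.Set.contains visited' n))).reverse ++ rest

-- while-loop of A
def pvLoopA (g : List (String × List String)) (target : String)
    (visited stack : List String) : Option String :=
  match stack with
  | [] => none
  | node :: rest =>
    let visited' := PySem.Set.add visited node
    if node == target then some node
    else pvLoopA g target visited' (pvPush g visited' node rest)
termination_by pvMu g visited stack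
decreasing_by
  unfold pvPush
  exact pvMu_dec g visited (PySem.Set.add visited node) node rest _
    (by intro x; by_cases h : node ∈ visited <;> simp [pysem, h] <;> aesop)
    (by rw [List.length_reverse]
        exact le_trans (List.length_filter_le _ _) (pvAdj_len g node))
    (by intro x hx
        rw [List.mem_reverse] at hx
        exact pvAdj_sub_univ g node x (List.mem_of_mem_filter hx))
    (by intro x hx
        rw [List.mem_reverse] at hx
        have h := List.of_mem_filter hx
        simp [pysem] at h ⊢
        tauto)

def search_anime_dfs (graph : List (String × List String)) (start_node : String) (target : String) : Option String :=
  pvLoopA graph target PySem.Set.empty [start_node]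

-- ===== PORT B =====

-- bigger = reach | {nb for node in reach for nb in graph.get(node, [])}
def pvBigger (g : List (String × List String)) (reach : List String) : List String :=
  PySem.Set.ofList (reach ++ reach.flatMap (fun n => pvAdj g n))

theorem pvBigger_mem (g : List (String × List String)) (reach : List String) (x : String) :
    x ∈ pvBigger g reach ↔ x ∈ reach ∨ ∃ n ∈ reach, x ∈ pvAdj g n := by
  unfold pvBigger
  simp [pysem]

-- while True: … ; stop when bigger == reach (set equality = mutual
-- membership; reach ⊆ bigger always, so one inclusion test suffices)
def pvLoopB (g : List (String × List String)) (reach : List String) : List String :=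
  if (pvBigger g reach).all (fun x => decide (x ∈ reach)) then reach
  else pvLoopB g (pvBigger g reach)
termination_by ((pvUniv g).toFinset \ reach.toFinset).card
decreasing_by
  rename_i hnotall
  simp only [List.all_eq_true, decide_eq_true_eq, not_forall] at hnotall
  obtain ⟨x, hxb, hxr⟩ := hnotall
  have hreach_sub : ∀ y ∈ reach, y ∈ pvBigger g reach := by
    intro y hy
    exact (pvBigger_mem g reach y).2 (Or.inl hy)
  have hxuniv : x ∈ pvUniv g := by
    rcases (pvBigger_mem g reach x).1 hxb with h | ⟨n, _, hn⟩
    · exact absurd h hxr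
    · exact pvAdj_sub_univ g n x hn
  apply Finset.card_lt_card
  refine ⟨fun y hy => ?_, fun hcon => ?_⟩
  · simp only [Finset.mem_sdiff, List.mem_toFinset] at hy ⊢
    exact ⟨hy.1, fun hyr => hy.2 (hreach_sub y hyr)⟩
  · have hmem : x ∈ (pvUniv g).toFinset \ reach.toFinset := by
      simp only [Finset.mem_sdiff, List.mem_toFinset]
      exact ⟨hxuniv, hxr⟩
    have := hcon hmem
    simp only [Finset.mem_sdiff, List.mem_toFinset] at this
    exact this.2 hxb

def search_anime_dfs_alt (graph : List (String × List String)) (start_node : String) (target : String) : Option String :=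
  if target ∈ pvLoopB graph (PySem.Set.ofList [start_node]) then some target else none

-- ===== PRECONDITION & SPEC =====
def Spec_search_anime_dfs (graph : List (String × List String)) (start_node : String) (target : String) (out : Option String) : Prop := out = search_anime_dfs_alt graph start_node target
instance (graph : List (String × List String)) (start_node : String) (target : String) (out : Option String) : Decidable (Spec_search_anime_dfs graph start_node target out) := by unfold Spec_search_anime_dfs; infer_instance

-- ===== CLAIM (what is proved, stated in full; the proofs are below) =====
def Claim_equal_search_anime_dfs : Prop := ∀ (graph : List (String × List String)) (start_node : String) (target : String), Dom_search_anime_dfs graph start_node target → Spec_search_anime_dfs graph start_node target (search_anime_dfs graph start_node target)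

-- ===== LEMMAS AND PROOFS =====

-- "t is reachable from v along edges whose endpoints avoid V"
inductive pvRA (g : List (String × List String)) (t : String) : List String → String → Prop
  | refl (V : List String) : pvRA g t V t
  | step (V : List String) (v w : String) : w ∈ pvAdj g v → ¬ w ∈ V → pvRA g t V w → pvRA g t V v





theorem pvRA_surgery (g : List (String × List String)) (t : String) (V V' : List String)
    (node : String) (hV' : ∀ x, x ∈ V' ↔ x ∈ V ∨ x = node) (v : String)
    (h : pvRA g t V v) :
    t = node ∨ pvRA g t V' v ∨ ∃ w, w ∈ pvAdj g node ∧ ¬ w ∈ V' ∧ pvRA g t V' w := by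
  induction h with
  | refl => exact Or.inr (Or.inl (pvRA.refl V'))
  | step v w hw hwV _ ih =>
    rcases ih with h1 | h1 | h1
    · exact Or.inl h1
    · by_cases hwn : w = node
      · subst hwn
        cases h1 with
        | refl => exact Or.inl rfl
        | step _ w' hw' hw'V' h'' => exact Or.inr (Or.inr ⟨w', hw', hw'V', h''⟩)
      · refine Or.inr (Or.inl (pvRA.step V' _ w hw ?_ h1))
        intro hcon
        rcases (hV' w).1 hcon with h2 | h2
        · exact hwV h2
        · exact hwn h2
    · exact Or.inr (Or.inr h1)

theorem pvLoopA_complete (g : List (String × List String)) (t : String) :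
    ∀ V S, (∃ v ∈ S, pvRA g t V v) → pvLoopA g t V S = some t := by
  intro V S
  fun_induction pvLoopA g t V S with
  | case1 => rintro ⟨v, hv, -⟩; cases hv
  | case2 V node rest heq =>
    rintro -
    rw [eq_of_beq heq]
  | case3 V node rest vis' hne ih =>
    rintro ⟨v, hv, hRA⟩
    have hnodet : node ≠ t := fun hc => (by simp [hc] at hne)
    have hV' : ∀ x, x ∈ PySem.Set.add V node ↔ x ∈ V ∨ x = node := by
      intro x; by_cases h : node ∈ V <;> simp [pysem, h] <;> aesop
    apply ih
    have hwit : ∀ w, w ∈ pvAdj g node → ¬ w ∈ PySem.Set.add V node → pvRA g t (PySem.Set.add V node) w →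
        ∃ u ∈ pvPush g (PySem.Set.add V node) node rest, pvRA g t (PySem.Set.add V node) u := by
      intro w hw1 hw2 hw3
      refine ⟨w, ?_, hw3⟩
      unfold pvPush
      refine List.mem_append.2 (Or.inl ?_)
      rw [List.mem_reverse]
      exact List.mem_filter.2 ⟨hw1, by simp [pysem, hw2]⟩
    rcases List.mem_cons.1 hv with hveq | hvrest
    · have hRA' : pvRA g t V node := hveq ▸ hRA
      rcases pvRA_surgery g t V _ node hV' _ hRA' with h1 | h1 | ⟨w, hw1, hw2, hw3⟩
      · exact absurd h1.symm hnodet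
      · cases h1
        · exact absurd rfl hnodet
        · rename_i w2 hw2a hw2b h2c
          exact hwit w2 (by assumption) (by assumption) (by assumption)
      · exact hwit w hw1 hw2 hw3
    · rcases pvRA_surgery g t V _ node hV' v hRA with h1 | h1 | ⟨w, hw1, hw2, hw3⟩
      · exact absurd h1.symm hnodet
      · exact ⟨v, by unfold pvPush; exact List.mem_append.2 (Or.inr hvrest), h1⟩
      · exact hwit w hw1 hw2 hw3

theorem pvLoopA_sound (g : List (String × List String)) (t : String) :
    ∀ V S x, pvLoopA g t V S = some x → x = t ∧ ∃ v ∈ S, pvRA g t [] v := by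
  intro V S
  fun_induction pvLoopA g t V S with
  | case1 => intro x hx; cases hx
  | case2 V node rest heq =>
    intro x hx
    have hxn : node = x := by injection hx
    have hnt : node = t := eq_of_beq heq
    subst hnt
    exact ⟨hxn.symm, node, List.mem_cons_self .., pvRA.refl []⟩
  | case3 V node rest vis' hne ih =>
    intro x hx
    obtain ⟨hxt, v, hvS, hRA⟩ := ih x hx
    refine ⟨hxt, ?_⟩
    unfold pvPush at hvS
    rcases List.mem_append.1 hvS with hvf | hvr
    · rw [List.mem_reverse] at hvf
      exact ⟨node, List.mem_cons_self .., pvRA.step [] node v (List.mem_of_mem_filter hvf)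
        (List.not_mem_nil) hRA⟩
    · exact ⟨v, List.mem_cons_of_mem _ hvr, hRA⟩

theorem pvRA_snoc (g : List (String × List String)) (s v w : String)
    (h : pvRA g v [] s) (hw : w ∈ pvAdj g v) : pvRA g w [] s := by
  have main : ∀ (V : List String) (s : String), pvRA g v V s → ¬ w ∈ V → pvRA g w V s := by
    intro V s h
    induction h with
    | refl => exact fun hwV => pvRA.step _ v w hw hwV (pvRA.refl _)
    | step u u' hu' hu'V _ ih => exact fun hwV => pvRA.step _ u u' hu' hu'V (ih hwV)
  exact main [] s h (List.not_mem_nil)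

theorem pvLoopB_sound (g : List (String × List String)) (s : String) :
    ∀ reach, (∀ x ∈ reach, pvRA g x [] s) → ∀ x ∈ pvLoopB g reach, pvRA g x [] s := by
  intro reach
  fun_induction pvLoopB g reach with
  | case1 reach _ => exact fun h => h
  | case2 reach hne ih =>
    intro h
    apply ih
    intro x hx
    rcases (pvBigger_mem g reach x).1 hx with h1 | ⟨n, hn, hxn⟩
    · exact h x h1
    · exact pvRA_snoc g s n x (h n hn) hxn

theorem pvLoopB_super (g : List (String × List String)) :
    ∀ reach, ∀ x ∈ reach, x ∈ pvLoopB g reach := by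
  intro reach
  fun_induction pvLoopB g reach with
  | case1 reach _ => exact fun x hx => hx
  | case2 reach hne ih =>
    intro x hx
    exact ih x ((pvBigger_mem g reach x).2 (Or.inl hx))

theorem pvLoopB_closed (g : List (String × List String)) :
    ∀ reach, ∀ v ∈ pvLoopB g reach, ∀ w ∈ pvAdj g v, w ∈ pvLoopB g reach := by
  intro reach
  fun_induction pvLoopB g reach with
  | case1 reach hall =>
    intro v hv w hw
    simp only [List.all_eq_true, decide_eq_true_eq] at hall
    exact hall w ((pvBigger_mem g reach w).2 (Or.inr ⟨v, hv, hw⟩))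
  | case2 reach hne ih => exact ih

theorem pvRA_mem_closed (g : List (String × List String)) (t : String) (R : List String)
    (hcl : ∀ v ∈ R, ∀ w ∈ pvAdj g v, w ∈ R) :
    ∀ v, pvRA g t [] v → v ∈ R → t ∈ R := by
  have main : ∀ (V : List String) (v : String), pvRA g t V v → v ∈ R → t ∈ R := by
    intro V v h
    induction h with
    | refl => exact fun hv => hv
    | step v w hw _ _ ih => exact fun hv => ih (hcl v hv w hw)
  exact main []

-- ===== VERDICT (by name: the statement is the Claim_ definition above) =====
theorem search_anime_dfs_spec : Claim_equal_search_anime_dfs := by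
  unfold Claim_equal_search_anime_dfs
  intro g s t _
  unfold Spec_search_anime_dfs search_anime_dfs search_anime_dfs_alt
  have hempty : (PySem.Set.empty : PySem.Set String) = [] := rfl
  have hofs : s ∈ PySem.Set.ofList [s] := by simp [pysem]
  by_cases h : pvRA g t [] s
  · rw [hempty, pvLoopA_complete g t [] [s] ⟨s, by simp, h⟩]
    have hs : s ∈ pvLoopB g (PySem.Set.ofList [s]) := pvLoopB_super g _ s hofs
    have ht : t ∈ pvLoopB g (PySem.Set.ofList [s]) :=
      pvRA_mem_closed g t _ (pvLoopB_closed g _) s h hs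
    rw [if_pos ht]
  · have hb : ¬ t ∈ pvLoopB g (PySem.Set.ofList [s]) := by
      intro ht
      apply h
      refine pvLoopB_sound g s _ ?_ t ht
      intro x hx
      have : x = s := by simpa [pysem] using hx
      rw [this]
      exact pvRA.refl []
    rw [if_neg hb]
    cases hA : pvLoopA g t PySem.Set.empty [s] with
    | none => rfl
    | some x =>
      exfalso
      rw [hempty] at hA
      obtain ⟨-, v, hv, hRA⟩ := pvLoopA_sound g t [] [s] x hA
      have : v = s := by simpa using hv
      exact h (this ▸ hRA)
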